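-- pv_equiv track=rewrite | github.com/pypi-data/pypi-mirror-378 | packages/katalytic/katalytic-0.5.1.tar.gz/katalytic-0.5.1/src/katalytic/data/data.py | detect_fronts
-- ===== SOURCE A (Python) =====
-- def detect_fronts(bits):
--     """Detects the fronts in a sequence of bits.
--
--     A front is a change from 0 to 1 (positive) or from 1 to 0 (negative).
--     It works even if the bits are booleans instead of 0/1.
--
--     Returns a list of tuples
--     Args:
--         bits (Iterable or str): A string or a list representing binary values.
--
--     Returns:
--         List[Tuple[int, int]]: The list of tuples representing the fronts
--             formatted as (index, bit) where index is the index at which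
--             the bit flip takes place and bit is 1 for positive fronts
--             and 0 for negative fronts.
--
--     Raises:
--         TypeError: If the bits are not of the expected types.
--
--     Example:
--         >>> bits = "00101101"
--         >>> detect_fronts(bits)
--         [(0, 0), (2, 1), (3, 0), (4, 1), (6, 0), (7, 1)]
--
--         >>> bits = [0, 0, 1, 0, 1, 1, 0, 1]
--         >>> detect_fronts(bits)
--         [(0, 0), (2, 1), (3, 0), (4, 1), (6, 0), (7, 1)]
--
--         >>> bits = [False, False, True, False, True, True, False, True]
--         >>> detect_fronts(bits)
--         [(0, 0), (2, 1), (3, 0), (4, 1), (6, 0), (7, 1)]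
--     """
--     try:
--         bits = [int(b.real) if isinstance(b, complex) else int(b) for b in bits]
--     except Exception:
--         raise ValueError(f"Only 0/1 or True/False are allowed. Got {bits!r}")
--
--     if not all(b in (0, 1) for b in bits):
--         raise ValueError(f"Only 0/1 or True/False are allowed. Got {bits!r}")
--
--     if not bits:
--         return []
--
--     fronts = [(0, bits[0])]
--     for i, (a, b) in enumerate(zip(bits, bits[1:], strict=False), start=1):
--         if a != b:
--             fronts.append((i, b))
--
--     return fronts
-- ===== SOURCE B (Python) =====
-- def detect_fronts(bits):
--     try:
--         bits = [int(b.real) if isinstance(b, complex) else int(b) for b in bits]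
--     except Exception:
--         raise ValueError(f"Only 0/1 or True/False are allowed. Got {bits!r}")
--
--     if not all(b in (0, 1) for b in bits):
--         raise ValueError(f"Only 0/1 or True/False are allowed. Got {bits!r}")
--
--     # run-skipping scan: each maximal run of equal bits contributes exactly one
--     # front (its start index); the inner loop jumps past the rest of the run.
--     fronts = []
--     n = len(bits)
--     i = 0
--     while i < n:
--         v = bits[i]
--         fronts.append((i, v))
--         i += 1
--         while i < n and bits[i] == v:
--             i += 1
--     return fronts
-- ===== Notes on version B (the rewrite author's own statement) =====
-- stated objective: alternative
-- what changed: Replaces A's adjacent-pair comparison (seed [(0,bits[0])] plus a zip(bits,bits[1:]) loop that appends at each unequal pair) with a two-level run-skipping scan: an outer loop that emits the start index of each maximal run and an inner loop that jumps past the run, so no pairwise zip and no per-element append test exists.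
import Mathlib
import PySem

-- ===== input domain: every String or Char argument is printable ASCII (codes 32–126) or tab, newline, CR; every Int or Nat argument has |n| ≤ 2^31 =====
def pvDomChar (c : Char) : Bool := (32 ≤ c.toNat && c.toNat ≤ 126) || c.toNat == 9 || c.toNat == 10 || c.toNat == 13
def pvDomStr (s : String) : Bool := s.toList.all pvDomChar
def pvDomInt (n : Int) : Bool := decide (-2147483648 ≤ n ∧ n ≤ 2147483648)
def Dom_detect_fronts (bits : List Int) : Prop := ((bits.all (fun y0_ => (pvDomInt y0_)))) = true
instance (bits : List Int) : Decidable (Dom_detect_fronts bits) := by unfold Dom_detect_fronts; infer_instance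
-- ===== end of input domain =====

-- B replaces A's zip(bits, bits[1:]) adjacent-pair loop (with its [(0,bits[0])] seed) by a
-- two-level run-skipping scan emitting the start of each maximal run (alternative; same O(n)).

-- ===== PORT A =====
-- step of A's 'for i, (a, b) in enumerate(zip(bits, bits[1:]), start=1)' loop
def dfStepA (st : List (Int × Int) × Int) (ab : Int × Int) : List (Int × Int) × Int :=
  (if ab.1 != ab.2 then st.1 ++ [(st.2, ab.2)] else st.1, st.2 + 1)

def detect_fronts (bits : List Int) : List (Int × Int) :=
  -- int(b) on an int is the identity; the validation raises outside Pre_, excluded below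
  match bits with
  | [] => []
  | b0 :: _ => ((bits.zip bits.tail).foldl dfStepA ([(0, b0)], 1)).1

-- ===== PORT B =====
-- inner 'while i < n and bits[i] == v: i += 1' loop of B (bits.getD i 0 = bits[i], guarded by i < n)
def dfSkip (bits : List Int) (v : Int) (i : Nat) : Nat :=
  if h : i < bits.length ∧ bits.getD i 0 = v then dfSkip bits v (i + 1) else i
termination_by bits.length - i
decreasing_by omega

lemma dfSkip_ge (bits : List Int) (v : Int) (i : Nat) : i ≤ dfSkip bits v i := by
  fun_induction dfSkip bits v i with
  | case1 i h ih => omega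
  | case2 i h => omega

-- outer 'while i < n' loop of B; each iteration appends one front, ported as cons
def dfOuter (bits : List Int) (i : Nat) : List (Int × Int) :=
  if h : i < bits.length then
    ((i : Int), bits.getD i 0) :: dfOuter bits (dfSkip bits (bits.getD i 0) (i + 1))
  else []
termination_by bits.length - i
decreasing_by have := dfSkip_ge bits (bits.getD i 0) (i + 1); omega

def detect_fronts_alt (bits : List Int) : List (Int × Int) :=
  dfOuter bits 0

-- ===== PRECONDITION & SPEC =====
-- Python A raises ValueError unless every element is 0 or 1; Pre_ admits exactly the returning inputs.
def Pre_detect_fronts (bits : List Int) : Prop := (bits.all (fun b => b == 0 || b == 1)) = true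
instance (bits : List Int) : Decidable (Pre_detect_fronts bits) := by unfold Pre_detect_fronts; infer_instance
def pvWitness_detect_fronts : List Int := [0, 0, 1, 0, 1, 1, 0, 1]

def Spec_detect_fronts (bits : List Int) (out : List (Int × Int)) : Prop := out = detect_fronts_alt bits
instance (bits : List Int) (out : List (Int × Int)) : Decidable (Spec_detect_fronts bits out) := by unfold Spec_detect_fronts; infer_instance

-- ===== CLAIM (what is proved, stated in full; the proofs are below) =====
def Claim_equal_detect_fronts : Prop := ∀ (bits : List Int), Dom_detect_fronts bits → Pre_detect_fronts bits → Spec_detect_fronts bits (detect_fronts bits)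

-- ===== LEMMAS AND PROOFS =====

-- common reference: fronts of l starting at index i, with prev the last emitted bit (if any)
def dfFr (prev : Option Int) (i : Int) : List Int → List (Int × Int)
  | [] => []
  | b :: r => if some b ≠ prev then (i, b) :: dfFr (some b) (i + 1) r else dfFr prev (i + 1) r

-- number of leading elements of l equal to v
def dfRun (v : Int) : List Int → Nat
  | [] => 0
  | b :: r => if b = v then dfRun v r + 1 else 0

-- ---- A side ----
-- B-shaped single-state scan used only as a proof intermediary for A's fold
def dfStepP (st : List (Int × Int) × Int × Option Int) (b : Int) : List (Int × Int) × Int × Option Int :=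
  if some b != st.2.2 then (st.1 ++ [(st.2.1, b)], st.2.1 + 1, some b)
  else (st.1, st.2.1 + 1, st.2.2)

lemma df_key (rest : List Int) (prev : Int) (i : Int) (acc : List (Int × Int)) :
    (((prev :: rest).zip rest).foldl dfStepA (acc, i)).1
      = (rest.foldl dfStepP (acc, i, some prev)).1 := by
  induction rest generalizing prev i acc with
  | nil => rfl
  | cons b r ih =>
    simp only [List.zip_cons_cons, List.foldl_cons]
    have h : dfStepA (acc, i) (prev, b)
        = ((dfStepP (acc, i, some prev) b).1, (dfStepP (acc, i, some prev) b).2.1) := by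
      simp only [dfStepA, dfStepP]
      by_cases hb : b = prev
      · subst hb; simp
      · simp [bne, hb, Ne.symm hb]
    rw [h]
    have h2 : (dfStepP (acc, i, some prev) b).2.2 = some b := by
      simp only [dfStepP]; split <;> simp_all [bne]
    calc (((b :: r).zip r).foldl dfStepA ((dfStepP (acc, i, some prev) b).1, (dfStepP (acc, i, some prev) b).2.1)).1
        = (r.foldl dfStepP ((dfStepP (acc, i, some prev) b).1, (dfStepP (acc, i, some prev) b).2.1, some b)).1 := ih _ _ _
      _ = (r.foldl dfStepP (dfStepP (acc, i, some prev) b)).1 := by rw [← h2]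

lemma foldP_fr (l : List Int) (acc : List (Int × Int)) (i : Int) (p : Option Int) :
    (l.foldl dfStepP (acc, i, p)).1 = acc ++ dfFr p i l := by
  induction l generalizing acc i p with
  | nil => simp [dfFr]
  | cons b r ih =>
    simp only [List.foldl_cons, dfStepP, dfFr]
    by_cases hb : some b = p
    · simp [hb, ih]
    · simp [hb, bne, ih]

lemma portA_fr (bits : List Int) : detect_fronts bits = dfFr none 0 bits := by
  cases bits with
  | nil => rfl
  | cons b0 r =>
    show (((b0 :: r).zip (b0 :: r).tail).foldl dfStepA ([(0, b0)], 1)).1 = _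
    rw [List.tail_cons, df_key, foldP_fr]
    simp [dfFr]

-- ---- B side ----
lemma dfSkip_eq (bits : List Int) (v : Int) (i : Nat) :
    dfSkip bits v i = i + dfRun v (bits.drop i) := by
  fun_induction dfSkip bits v i with
  | case1 i h ih =>
    obtain ⟨hi, hv⟩ := h
    have hd : bits.drop i = bits[i] :: bits.drop (i + 1) := List.drop_eq_getElem_cons hi
    have hg : bits.getD i 0 = bits[i] := List.getD_eq_getElem bits 0 hi
    rw [ih, hd, dfRun]
    rw [hg] at hv
    simp [hv]; omega
  | case2 i h =>
    by_cases hi : i < bits.length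
    · have hv : bits.getD i 0 ≠ v := by tauto
      have hd : bits.drop i = bits[i] :: bits.drop (i + 1) := List.drop_eq_getElem_cons hi
      have hg : bits.getD i 0 = bits[i] := List.getD_eq_getElem bits 0 hi
      rw [hd, dfRun]
      rw [hg] at hv
      simp [hv]
    · have : bits.drop i = [] := List.drop_eq_nil_of_le (by omega)
      simp [this, dfRun]

-- skipping a leading run of v is what dfFr (some v) does
lemma fr_skip (l : List Int) (v : Int) (i : Int) :
    dfFr (some v) i l = dfFr none (i + dfRun v l) (l.drop (dfRun v l)) := by
  induction l generalizing i with
  | nil => simp [dfRun, dfFr]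
  | cons b r ih =>
    by_cases hb : b = v
    · subst hb
      simp only [dfFr, dfRun]
      rw [if_neg (by simp), ih]
      congr 1
      push_cast; ring
    · simp only [dfFr, dfRun, if_neg hb]
      rw [if_pos (by simp [hb])]
      simp [dfFr]

lemma dfOuter_fr (bits : List Int) (i : Nat) :
    dfOuter bits i = dfFr none (i : Int) (bits.drop i) := by
  fun_induction dfOuter bits i with
  | case1 i hi ih =>
    have hd : bits.drop i = bits[i] :: bits.drop (i + 1) := List.drop_eq_getElem_cons hi
    have hg : bits.getD i 0 = bits[i] := List.getD_eq_getElem bits 0 hi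
    rw [ih, dfSkip_eq, hd, dfFr, if_pos (by simp), hg]
    congr 1
    rw [fr_skip, List.drop_drop]
    push_cast
    ring_nf
  | case2 i hi =>
    have : bits.drop i = [] := List.drop_eq_nil_of_le (by omega)
    simp [this, dfFr]

-- ===== VERDICT (by name: the statement is the Claim_ definition above) =====
theorem detect_fronts_spec : Claim_equal_detect_fronts := by
  intro bits _ _
  unfold Spec_detect_fronts detect_fronts_alt
  rw [portA_fr, dfOuter_fr]
  simp
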